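-- pv_equiv track=rewrite | github.com/wmcclinton/Curious-HAC | plot_pickle.py | get_episode_rewards
-- ===== SOURCE A (Python) =====
-- def get_episode_rewards(data):
--     intrinsic_rewards = []
--     extrinsic_rewards = []
--
--     eps_r_i = []
--     eps_r_e = []
--
--     for datum in data:
--         eps_r_i.append(datum[0])
--         eps_r_e.append(datum[1])
--         if datum[2]:
--             intrinsic_rewards.append(sum(eps_r_i))
--             extrinsic_rewards.append(sum(eps_r_e))
--             eps_r_i = []
--             eps_r_e = []
--
--     return intrinsic_rewards, extrinsic_rewards
-- ===== SOURCE B (Python) =====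
-- def get_episode_rewards(data):
--     # Stage 1: global cumulative totals (never reset), sampled at each done flag.
--     picks_i = []
--     picks_e = []
--     total_i = 0
--     total_e = 0
--     for datum in data:
--         total_i += datum[0]
--         total_e += datum[1]
--         if datum[2]:
--             picks_i.append(total_i)
--             picks_e.append(total_e)
--     # Stage 2: each episode's sum is an adjacent difference of the sampled totals.
--     intrinsic_rewards = [q - p for p, q in zip([0] + picks_i, picks_i)]
--     extrinsic_rewards = [q - p for p, q in zip([0] + picks_e, picks_e)]
--     return intrinsic_rewards, extrinsic_rewards
-- ===== Notes on version B (the rewrite author's own statement) =====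
-- stated objective: alternative
-- what changed: Instead of flushing per-episode buffers at each done flag, B samples never-resetting global cumulative totals at the done positions and recovers each episode's sum in a second pass as adjacent differences of those samples.
import Mathlib
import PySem

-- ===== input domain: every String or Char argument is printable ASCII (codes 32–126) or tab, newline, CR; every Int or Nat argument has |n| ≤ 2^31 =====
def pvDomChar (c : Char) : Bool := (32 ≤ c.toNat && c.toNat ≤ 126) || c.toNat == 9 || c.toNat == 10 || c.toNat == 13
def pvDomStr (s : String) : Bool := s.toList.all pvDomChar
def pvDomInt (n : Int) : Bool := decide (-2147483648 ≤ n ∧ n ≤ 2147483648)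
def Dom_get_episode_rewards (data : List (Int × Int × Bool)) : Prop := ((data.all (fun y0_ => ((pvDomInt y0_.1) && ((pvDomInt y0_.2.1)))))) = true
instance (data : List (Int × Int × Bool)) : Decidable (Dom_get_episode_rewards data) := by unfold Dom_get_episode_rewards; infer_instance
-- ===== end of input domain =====

-- B replaces A's per-episode flush (buffer then sum at each done flag) with a two-stage
-- prefix-sum scheme: sample never-resetting cumulative totals at the done positions,
-- then recover episode sums as adjacent differences (objective: alternative).

-- ===== PORT A =====
-- A's loop state: result lists and the two episode buffer lists.
def getEpLoopA : List (Int × Int × Bool) → List Int → List Int → List Int → List Int →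
    List Int × List Int
  | [], intr, extr, _, _ => (intr, extr)
  | (a, b, d) :: rest, intr, extr, epsI, epsE =>
    let epsI' := epsI ++ [a]
    let epsE' := epsE ++ [b]
    if d then
      getEpLoopA rest (intr ++ [epsI'.sum]) (extr ++ [epsE'.sum]) [] []
    else
      getEpLoopA rest intr extr epsI' epsE'

def get_episode_rewards (data : List (Int × Int × Bool)) : List Int × List Int :=
  getEpLoopA data [] [] [] []

-- ===== PORT B =====
-- Stage 1: global cumulative totals (never reset), sampled at each done flag.
def pickLoopB : List (Int × Int × Bool) → List Int → List Int → Int → Int →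
    List Int × List Int
  | [], picksI, picksE, _, _ => (picksI, picksE)
  | (a, b, d) :: rest, picksI, picksE, totI, totE =>
    let totI' := totI + a
    let totE' := totE + b
    if d then
      pickLoopB rest (picksI ++ [totI']) (picksE ++ [totE']) totI' totE'
    else
      pickLoopB rest picksI picksE totI' totE'

-- Stage 2: [q - p for p, q in zip([0] + picks, picks)]
def adjDiffsB (picks : List Int) : List Int :=
  ((0 :: picks).zip picks).map (fun pq => pq.2 - pq.1)

def get_episode_rewards_alt (data : List (Int × Int × Bool)) : List Int × List Int :=
  let picks := pickLoopB data [] [] 0 0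
  (adjDiffsB picks.1, adjDiffsB picks.2)

-- ===== PRECONDITION & SPEC =====
def Spec_get_episode_rewards (data : List (Int × Int × Bool)) (out : List Int × List Int) : Prop := out = get_episode_rewards_alt data
instance (data : List (Int × Int × Bool)) (out : List Int × List Int) : Decidable (Spec_get_episode_rewards data out) := by unfold Spec_get_episode_rewards; infer_instance

-- ===== CLAIM (what is proved, stated in full; the proofs are below) =====
def Claim_equal_get_episode_rewards : Prop := ∀ (data : List (Int × Int × Bool)), Dom_get_episode_rewards data → Spec_get_episode_rewards data (get_episode_rewards data)

-- ===== LEMMAS AND PROOFS =====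

-- Accumulator-free version of A's loop.
def aRun : List (Int × Int × Bool) → List Int → List Int → List Int × List Int
  | [], _, _ => ([], [])
  | (a, b, d) :: rest, bufI, bufE =>
    if d then
      let r := aRun rest [] []
      ((bufI ++ [a]).sum :: r.1, (bufE ++ [b]).sum :: r.2)
    else
      aRun rest (bufI ++ [a]) (bufE ++ [b])

-- Accumulator-free version of B's sampling loop.
def pRun : List (Int × Int × Bool) → Int → Int → List Int × List Int
  | [], _, _ => ([], [])
  | (a, b, d) :: rest, s, t =>
    if d then
      let r := pRun rest (s + a) (t + b)
      ((s + a) :: r.1, (t + b) :: r.2)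
    else
      pRun rest (s + a) (t + b)

-- Recursive form of the adjacent-difference pass.
def diffs : Int → List Int → List Int
  | _, [] => []
  | p, q :: rest => (q - p) :: diffs q rest

theorem adjDiffsB_eq_diffs (picks : List Int) : ∀ p : Int,
    ((p :: picks).zip picks).map (fun pq => pq.2 - pq.1) = diffs p picks := by
  induction picks with
  | nil => intro p; rfl
  | cons q rest ih =>
    intro p
    simp only [List.zip_cons_cons, List.map, diffs, ih q]

theorem getEpLoopA_eq_aRun (data : List (Int × Int × Bool)) :
    ∀ (intr extr bufI bufE : List Int),
      getEpLoopA data intr extr bufI bufE =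
        (intr ++ (aRun data bufI bufE).1, extr ++ (aRun data bufI bufE).2) := by
  induction data with
  | nil => intro intr extr bufI bufE; simp [getEpLoopA, aRun]
  | cons hd rest ih =>
    intro intr extr bufI bufE
    obtain ⟨a, b, d⟩ := hd
    cases d with
    | true => simp [getEpLoopA, aRun, ih]
    | false => simp [getEpLoopA, aRun, ih]

theorem pickLoopB_eq_pRun (data : List (Int × Int × Bool)) :
    ∀ (picksI picksE : List Int) (s t : Int),
      pickLoopB data picksI picksE s t =
        (picksI ++ (pRun data s t).1, picksE ++ (pRun data s t).2) := by
  induction data with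
  | nil => intro picksI picksE s t; simp [pickLoopB, pRun]
  | cons hd rest ih =>
    intro picksI picksE s t
    obtain ⟨a, b, d⟩ := hd
    cases d with
    | true => simp [pickLoopB, pRun, ih]
    | false => simp [pickLoopB, pRun, ih]

theorem diffs_pRun_eq_aRun (data : List (Int × Int × Bool)) :
    ∀ (p q : Int) (bufI bufE : List Int),
      diffs p (pRun data (p + bufI.sum) (q + bufE.sum)).1 = (aRun data bufI bufE).1 ∧
      diffs q (pRun data (p + bufI.sum) (q + bufE.sum)).2 = (aRun data bufI bufE).2 := by
  induction data with
  | nil => intro p q bufI bufE; simp [pRun, aRun, diffs]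
  | cons hd rest ih =>
    intro p q bufI bufE
    obtain ⟨a, b, d⟩ := hd
    cases d with
    | true =>
      have h := ih (p + bufI.sum + a) (q + bufE.sum + b) [] []
      simp only [List.sum_nil, add_zero] at h
      simp [pRun, aRun, diffs, h.1, h.2]
      constructor <;> ring
    | false =>
      have h := ih p q (bufI ++ [a]) (bufE ++ [b])
      simp only [List.sum_append, List.sum_cons, List.sum_nil, add_zero] at h
      simpa [pRun, aRun, add_assoc] using h

-- ===== VERDICT (by name: the statement is the Claim_ definition above) =====
theorem get_episode_rewards_spec : Claim_equal_get_episode_rewards := by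
  intro data _
  unfold Spec_get_episode_rewards get_episode_rewards get_episode_rewards_alt adjDiffsB
  have hA := getEpLoopA_eq_aRun data [] [] [] []
  have hB := pickLoopB_eq_pRun data [] [] 0 0
  have h := diffs_pRun_eq_aRun data 0 0 [] []
  simp only [List.sum_nil, add_zero] at h
  simp [hA, hB, adjDiffsB_eq_diffs, h.1, h.2]
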